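-- pv_equiv track=rewrite | github.com/Dinnerb0ne2/pvim | src/features/incremental_syntax.py | _next_depth
-- ===== SOURCE A (Python) =====
-- _OPEN_TO_CLOSE = {"(": ")", "[": "]", "{": "}"}
--
-- _CLOSE_TO_OPEN = {")": "(", "]": "[", "}": "{"}
--
-- def _next_depth(text: str, current_depth: int) -> int:
--     depth = max(0, current_depth)
--     in_single = False
--     in_double = False
--     escaped = False
--     for char in text:
--         if escaped:
--             escaped = False
--             continue
--         if (in_single or in_double) and char == "\\":
--             escaped = True
--             continue
--         if in_single:
--             if char == "'":
--                 in_single = False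
--             continue
--         if in_double:
--             if char == '"':
--                 in_double = False
--             continue
--         if char == "'":
--             in_single = True
--             continue
--         if char == '"':
--             in_double = True
--             continue
--         if char in _OPEN_TO_CLOSE:
--             depth += 1
--             continue
--         if char in _CLOSE_TO_OPEN:
--             depth = max(0, depth - 1)
--     return depth
-- ===== SOURCE B (Python) =====
-- def _next_depth(text: str, current_depth: int) -> int:
--     depth = max(0, current_depth)
--     n = len(text)
--     i = 0
--     while i < n:
--         ch = text[i]
--         if ch == "'" or ch == '"':
--             quote = ch
--             i += 1
--             while i < n:
--                 c = text[i]
--                 if c == "\\":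
--                     i += 2
--                 elif c == quote:
--                     i += 1
--                     break
--                 else:
--                     i += 1
--             continue
--         if ch in "([{":
--             depth += 1
--         elif ch in ")]}":
--             depth = max(0, depth - 1)
--         i += 1
--     return depth
-- ===== Notes on version B (the rewrite author's own statement) =====
-- stated objective: alternative
-- what changed: Replaced the flag-machine (in_single/in_double/escaped booleans threaded through one for-loop) with an index-driven scanner whose dedicated inner loop consumes a whole string literal (advancing by 2 over escapes), so no state flags exist.
import Mathlib
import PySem

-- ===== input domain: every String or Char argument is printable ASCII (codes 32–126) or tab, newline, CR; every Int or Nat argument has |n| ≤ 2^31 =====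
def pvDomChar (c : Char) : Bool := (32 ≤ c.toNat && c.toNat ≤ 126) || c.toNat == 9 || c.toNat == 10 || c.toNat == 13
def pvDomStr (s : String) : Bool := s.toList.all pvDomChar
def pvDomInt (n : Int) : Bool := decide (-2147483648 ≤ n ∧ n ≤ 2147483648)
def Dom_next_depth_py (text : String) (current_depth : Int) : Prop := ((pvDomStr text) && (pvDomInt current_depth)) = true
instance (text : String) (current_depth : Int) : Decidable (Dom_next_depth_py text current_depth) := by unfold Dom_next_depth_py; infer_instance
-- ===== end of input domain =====

-- B replaces A's in_single/in_double/escaped flag machine by a nested scanner that consumes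
-- each string literal in an inner loop (objective: alternative decomposition, same cost).

-- ===== PORT A =====
-- one step of A's for-loop over state (depth, in_single, in_double, escaped)
def stepA (st : Int × Bool × Bool × Bool) (c : Char) : Int × Bool × Bool × Bool :=
  match st with
  | (depth, sg, db, esc) =>
    if esc = true then (depth, sg, db, false)
    else if (sg = true ∨ db = true) ∧ c = '\\' then (depth, sg, db, true)
    else if sg = true then
      (if c = '\'' then (depth, false, db, false) else (depth, sg, db, false))
    else if db = true then
      (if c = '"' then (depth, sg, false, false) else (depth, sg, db, false))
    else if c = '\'' then (depth, true, db, false)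
    else if c = '"' then (depth, sg, true, false)
    else if c = '(' ∨ c = '[' ∨ c = '{' then (depth + 1, sg, db, false)
    else if c = ')' ∨ c = ']' ∨ c = '}' then (max 0 (depth - 1), sg, db, false)
    else (depth, sg, db, false)

def next_depth_py (text : String) (current_depth : Int) : Int :=
  (text.toList.foldl stepA (max 0 current_depth, false, false, false)).1

-- ===== PORT B =====
-- B's inner while-loop: consume a string literal's body, return the rest of the text
def scanStrB (quote : Char) (cs : List Char) : List Char :=
  match cs with
  | [] => []
  | c :: rest =>
    if c = '\\' then scanStrB quote rest.tail
    else if c = quote then rest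
    else scanStrB quote rest
termination_by cs.length
decreasing_by
  · simp only [List.length_cons]
    have : rest.tail.length = rest.length - 1 := List.length_tail
    omega
  · simp

theorem scanStrB_length_le (quote : Char) (cs : List Char) :
    (scanStrB quote cs).length ≤ cs.length := by
  match cs with
  | [] => simp [scanStrB]
  | c :: rest =>
    rw [scanStrB]
    split_ifs
    · have := scanStrB_length_le quote rest.tail
      have : rest.tail.length = rest.length - 1 := List.length_tail
      simp only [List.length_cons]; omega
    · simp
    · have := scanStrB_length_le quote rest
      simp only [List.length_cons]; omega
termination_by cs.length
decreasing_by
  · simp only [List.length_cons]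
    have : rest.tail.length = rest.length - 1 := List.length_tail
    omega
  · simp

-- B's outer while-loop
def scanB (cs : List Char) (depth : Int) : Int :=
  match cs with
  | [] => depth
  | c :: rest =>
    if c = '\'' ∨ c = '"' then scanB (scanStrB c rest) depth
    else if c = '(' ∨ c = '[' ∨ c = '{' then scanB rest (depth + 1)
    else if c = ')' ∨ c = ']' ∨ c = '}' then scanB rest (max 0 (depth - 1))
    else scanB rest depth
termination_by cs.length
decreasing_by
  · have := scanStrB_length_le c rest
    simp only [List.length_cons]; omega
  all_goals simp

def next_depth_py_alt (text : String) (current_depth : Int) : Int :=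
  scanB text.toList (max 0 current_depth)

-- ===== PRECONDITION & SPEC =====
def Spec_next_depth_py (text : String) (current_depth : Int) (out : Int) : Prop := out = next_depth_py_alt text current_depth
instance (text : String) (current_depth : Int) (out : Int) : Decidable (Spec_next_depth_py text current_depth out) := by unfold Spec_next_depth_py; infer_instance

-- ===== CLAIM (what is proved, stated in full; the proofs are below) =====
def Claim_equal_next_depth_py : Prop := ∀ (text : String) (current_depth : Int), Dom_next_depth_py text current_depth → Spec_next_depth_py text current_depth (next_depth_py text current_depth)

-- ===== LEMMAS AND PROOFS =====

-- inside a single-quoted string, A's flag machine agrees with B's inner scan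
theorem scan_single (cs : List Char) (d : Int) :
    (List.foldl stepA (d, true, false, false) cs).1
      = (List.foldl stepA (d, false, false, false) (scanStrB '\'' cs)).1 := by
  match cs with
  | [] => simp [scanStrB]
  | c :: rest =>
    by_cases hb : c = '\\'
    · subst hb
      match rest with
      | [] => simp [scanStrB, stepA]
      | c2 :: rest2 =>
        have ih := scan_single rest2 d
        simpa [scanStrB, stepA] using ih
    · by_cases hq : c = '\''
      · subst hq
        simp [scanStrB, stepA]
      · have ih := scan_single rest d
        simpa [scanStrB, stepA, hb, hq] using ih
termination_by cs.length
decreasing_by all_goals simp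

-- inside a double-quoted string, A's flag machine agrees with B's inner scan
theorem scan_double (cs : List Char) (d : Int) :
    (List.foldl stepA (d, false, true, false) cs).1
      = (List.foldl stepA (d, false, false, false) (scanStrB '"' cs)).1 := by
  match cs with
  | [] => simp [scanStrB]
  | c :: rest =>
    by_cases hb : c = '\\'
    · subst hb
      match rest with
      | [] => simp [scanStrB, stepA]
      | c2 :: rest2 =>
        have ih := scan_double rest2 d
        simpa [scanStrB, stepA] using ih
    · by_cases hq : c = '"'
      · subst hq
        simp [scanStrB, stepA]
      · have ih := scan_double rest d
        simpa [scanStrB, stepA, hb, hq] using ih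
termination_by cs.length
decreasing_by all_goals simp

-- A's loop from the neutral (outside-string) state computes B's outer scan
theorem main_lemma (cs : List Char) (d : Int) :
    (List.foldl stepA (d, false, false, false) cs).1 = scanB cs d := by
  match cs with
  | [] => simp [scanB]
  | c :: rest =>
    by_cases h1 : c = '\''
    · subst h1
      rw [scanB]
      simp only [List.foldl, stepA]
      norm_num
      rw [scan_single]
      exact main_lemma (scanStrB '\'' rest) d
    · by_cases h2 : c = '"'
      · subst h2
        rw [scanB]
        simp only [List.foldl, stepA]
        norm_num
        rw [if_neg (by decide), scan_double]
        exact main_lemma (scanStrB '"' rest) d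
      · by_cases h3 : c = '(' ∨ c = '[' ∨ c = '{'
        · have ih := main_lemma rest (d + 1)
          rw [scanB]
          simp [stepA, h1, h2, h3, ih]
        · by_cases h4 : c = ')' ∨ c = ']' ∨ c = '}'
          · have ih := main_lemma rest (max 0 (d - 1))
            rw [scanB]
            simp [stepA, h1, h2, h3, h4, ih]
          · have ih := main_lemma rest d
            rw [scanB]
            simp [stepA, h1, h2, h3, h4, ih]
termination_by cs.length
decreasing_by
  · have := scanStrB_length_le '\'' rest
    simp only [List.length_cons]; omega
  · have := scanStrB_length_le '"' rest
    simp only [List.length_cons]; omega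
  all_goals simp

-- ===== VERDICT (by name: the statement is the Claim_ definition above) =====
theorem next_depth_py_spec : Claim_equal_next_depth_py := by
  intro text current_depth _
  unfold Spec_next_depth_py next_depth_py next_depth_py_alt
  exact main_lemma text.toList (max 0 current_depth)
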